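-- pv_equiv track=rewrite | github.com/phonotechnologies/cicosts-api | package-py311/app/workers/handler.py | _determine_runner_type
-- ===== SOURCE A (Python) =====
-- def _determine_runner_type(labels: list) -> str:
--     """
--     Determine runner type from job labels.
--
--     Labels like ["ubuntu-latest", "self-hosted"] - we pick the most specific.
--     """
--     # Priority order for runner type detection
--     runner_keywords = [
--         "macos-latest-xlarge", "macos-latest-large",
--         "macos-14", "macos-13", "macos-12", "macos-latest",
--         "windows-2022", "windows-2019", "windows-latest",
--         "ubuntu-latest-64-cores", "ubuntu-latest-32-cores",
--         "ubuntu-latest-16-cores", "ubuntu-latest-8-cores",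
--         "ubuntu-latest-4-cores",
--         "ubuntu-22.04-arm", "ubuntu-latest-arm",
--         "ubuntu-22.04", "ubuntu-20.04", "ubuntu-latest",
--     ]
--
--     labels_lower = [l.lower() for l in labels]
--
--     for runner in runner_keywords:
--         if runner in labels_lower:
--             return runner
--
--     # Default to ubuntu-latest if self-hosted or unknown
--     return "ubuntu-latest"
-- ===== SOURCE B (Python) =====
-- def _determine_runner_type(labels: list) -> str:
--     """Single pass over labels with a prebuilt priority index, tracking the best rank seen."""
--     runner_keywords = [
--         "macos-latest-xlarge", "macos-latest-large",
--         "macos-14", "macos-13", "macos-12", "macos-latest",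
--         "windows-2022", "windows-2019", "windows-latest",
--         "ubuntu-latest-64-cores", "ubuntu-latest-32-cores",
--         "ubuntu-latest-16-cores", "ubuntu-latest-8-cores",
--         "ubuntu-latest-4-cores",
--         "ubuntu-22.04-arm", "ubuntu-latest-arm",
--         "ubuntu-22.04", "ubuntu-20.04", "ubuntu-latest",
--     ]
--     priority = {kw: i for i, kw in enumerate(runner_keywords)}
--     best = None  # (lowered label, rank)
--     for label in labels:
--         low = label.lower()
--         rank = priority.get(low)
--         if rank is not None and (best is None or rank < best[1]):
--             best = (low, rank)
--     return best[0] if best is not None else "ubuntu-latest"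
-- ===== Notes on version B (the rewrite author's own statement) =====
-- stated objective: faster
-- what changed: B builds a keyword->rank dict once and makes a single pass over the labels tracking the minimum-rank match, instead of A's priority-ordered scan over the keyword list with an inner membership test of the lowered label list.
import Mathlib
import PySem

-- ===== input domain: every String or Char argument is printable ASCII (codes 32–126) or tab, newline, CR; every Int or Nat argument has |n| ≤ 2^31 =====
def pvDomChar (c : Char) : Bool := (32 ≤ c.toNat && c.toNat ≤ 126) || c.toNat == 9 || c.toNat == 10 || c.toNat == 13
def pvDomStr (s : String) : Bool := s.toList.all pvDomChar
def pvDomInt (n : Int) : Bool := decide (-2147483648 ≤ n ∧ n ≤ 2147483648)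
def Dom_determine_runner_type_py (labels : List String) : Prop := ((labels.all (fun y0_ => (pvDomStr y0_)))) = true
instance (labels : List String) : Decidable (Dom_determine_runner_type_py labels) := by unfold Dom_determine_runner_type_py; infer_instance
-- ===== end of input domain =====

-- B replaces A's priority-ordered scan of the keyword list (with an inner membership test of the
-- lowered labels) by one pass over the labels, looking each up in a prebuilt keyword->rank dict and
-- keeping the match of least rank (one pass over labels instead of a scan per keyword; measured faster).

-- ===== PORT A =====
-- the shared constant list of runner keywords (data only, used by both ports)
def pvKws : List String :=
  ["macos-latest-xlarge", "macos-latest-large",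
   "macos-14", "macos-13", "macos-12", "macos-latest",
   "windows-2022", "windows-2019", "windows-latest",
   "ubuntu-latest-64-cores", "ubuntu-latest-32-cores",
   "ubuntu-latest-16-cores", "ubuntu-latest-8-cores",
   "ubuntu-latest-4-cores",
   "ubuntu-22.04-arm", "ubuntu-latest-arm",
   "ubuntu-22.04", "ubuntu-20.04", "ubuntu-latest"]

-- the 'for runner in runner_keywords: if runner in labels_lower: return runner' loop
def pvScanA : List String → List String → String
  | [], _ => "ubuntu-latest"
  | k :: ks, lows => if lows.contains k then k else pvScanA ks lows

def determine_runner_type_py (labels : List String) : String :=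
  let labels_lower := labels.map PySem.Str.lower
  pvScanA pvKws labels_lower

-- ===== PORT B =====
-- priority = {kw: i for i, kw in enumerate(runner_keywords)}
def pvPriority : PySem.Dict String Int :=
  (PySem.List.enumerate pvKws 0).foldl (fun d p => d.insert p.2 p.1) PySem.Dict.empty

-- one iteration of B's loop over the labels: best := (low, rank) when rank improves
def pvStepB (best : Option (String × Int)) (label : String) : Option (String × Int) :=
  let low := PySem.Str.lower label
  match pvPriority.get? low with
  | none => best
  | some rank =>
    match best with
    | none => some (low, rank)
    | some (_, j) => if rank < j then some (low, rank) else best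

def determine_runner_type_py_alt (labels : List String) : String :=
  match labels.foldl pvStepB none with
  | some (l, _) => l
  | none => "ubuntu-latest"

-- ===== PRECONDITION & SPEC =====
def Spec_determine_runner_type_py (labels : List String) (out : String) : Prop := out = determine_runner_type_py_alt labels
instance (labels : List String) (out : String) : Decidable (Spec_determine_runner_type_py labels out) := by unfold Spec_determine_runner_type_py; infer_instance

-- ===== CLAIM (what is proved, stated in full; the proofs are below) =====
def Claim_equal_determine_runner_type_py : Prop := ∀ (labels : List String), Dom_determine_runner_type_py labels → Spec_determine_runner_type_py labels (determine_runner_type_py labels)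

-- ===== LEMMAS AND PROOFS =====

-- B's step on an already-lowered string (pvStepB b l = pvCore b (lower l))
def pvCore (best : Option (String × Int)) (low : String) : Option (String × Int) :=
  match pvPriority.get? low with
  | none => best
  | some rank =>
    match best with
    | none => some (low, rank)
    | some (_, j) => if rank < j then some (low, rank) else best

-- minimum of two optional ranks
def pvMinO : Option Nat → Option Nat → Option Nat
  | none, b => b
  | a, none => a
  | some i, some j => some (min i j)

-- abstract state: an optional rank, realised as (keyword at that rank, rank)
def pvMval (o : Option Nat) : Option (String × Int) :=
  o.map (fun i => (pvKws.getD i "", (i : Int)))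

-- running minimum rank of a list of lowered labels, relative to a keyword list
def pvIdxMin (ks : List String) (lows : List String) (o : Option Nat) : Option Nat :=
  lows.foldl (fun a l => pvMinO a (ks.idxOf? l)) o

theorem pvKws_nodup : pvKws.Nodup := by decide

theorem pvEnumDict_get? (ks : List String) (s : Int) (l : String) :
    (PySem.Dict.mk ((PySem.List.enumerate ks s).map (fun p => (p.2, p.1)))).get? l
      = (ks.idxOf? l).map (fun i : Nat => (i : Int) + s) := by
  induction ks generalizing s with
  | nil => simp [PySem.List.enumerate_nil, PySem.Dict.get?, List.idxOf?]
  | cons k ks ih =>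
    rw [PySem.List.enumerate_cons]
    simp only [List.map_cons, PySem.Dict.get?_mk_cons, List.idxOf?, List.findIdx?_cons]
    by_cases hk : k = l
    · simp [hk]
    · have : (k == l) = false := by simp [hk]
      simp only [this, Bool.false_eq_true, if_false, List.idxOf?] at *
      rw [ih (s + 1)]
      cases List.findIdx? (fun b => b == l) ks with
      | none => simp
      | some m => simp; ring

theorem pvPriority_get? (l : String) :
    pvPriority.get? l = (pvKws.idxOf? l).map (fun i : Nat => (i : Int)) := by
  have hitems : pvPriority.items = (PySem.List.enumerate pvKws 0).map (fun p => (p.2, p.1)) := by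
    unfold pvPriority
    have := PySem.Dict.items_foldl_insert_fresh (l := PySem.List.enumerate pvKws 0)
      (k := fun p => p.2) (v := fun p => p.1) (d := PySem.Dict.empty)
      (by intro a _; simp [PySem.Dict.contains_empty])
      (by rw [PySem.List.map_snd_enumerate]; exact pvKws_nodup)
    simpa [PySem.Dict.empty] using this
  have hd : pvPriority = PySem.Dict.mk ((PySem.List.enumerate pvKws 0).map (fun p => (p.2, p.1))) :=
    PySem.Dict.ext hitems
  rw [hd, pvEnumDict_get? pvKws 0 l]
  cases pvKws.idxOf? l <;> simp

-- rank values coming out of idxOf? are in range and name their keyword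
theorem pvIdx_spec {ks : List String} {l : String} {i : Nat} (h : ks.idxOf? l = some i) :
    i < ks.length ∧ ks[i]? = some l := by
  rw [List.idxOf?_eq_some_iff] at h
  obtain ⟨hlt, heq, -⟩ := h
  exact ⟨hlt, by simp [List.getElem?_eq_getElem hlt, heq]⟩

-- one step of B's loop, in terms of the abstract rank state
theorem pvCore_mval (o : Option Nat) (l : String) :
    pvCore (pvMval o) l = pvMval (pvMinO o (pvKws.idxOf? l)) := by
  unfold pvCore
  rw [pvPriority_get?]
  cases h : pvKws.idxOf? l with
  | none => cases o <;> simp [pvMval, pvMinO]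
  | some i =>
    obtain ⟨hlt, heq⟩ := pvIdx_spec h
    cases o with
    | none => simp [pvMval, pvMinO, List.getD_eq_getElem?_getD, heq]
    | some j =>
      simp only [Option.map_some, pvMval, pvMinO]
      by_cases hij : i < j
      · have hij' : (i : Int) < (j : Int) := by exact_mod_cast hij
        simp [hij', Nat.min_eq_right (Nat.le_of_lt hij), List.getD_eq_getElem?_getD, heq]
      · have hij' : ¬ ((i : Int) < (j : Int)) := by exact_mod_cast hij
        simp [hij', Nat.min_eq_left (Nat.le_of_not_lt hij)]

-- B's whole loop computes the running minimum rank
theorem pvFoldB (lows : List String) (o : Option Nat) :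
    lows.foldl pvCore (pvMval o) = pvMval (pvIdxMin pvKws lows o) := by
  induction lows generalizing o with
  | nil => rfl
  | cons l rest ih => rw [List.foldl_cons, pvCore_mval, pvIdxMin, List.foldl_cons]; exact ih _

-- a minimum that has seen rank 0 stays 0
theorem pvIdxMin_zero (ks lows : List String) {a : Option Nat}
    (ha : a = some 0) : lows.foldl (fun a l => pvMinO a (ks.idxOf? l)) a = some 0 := by
  induction lows generalizing a with
  | nil => exact ha
  | cons l rest ih =>
    rw [List.foldl_cons]
    apply ih
    subst ha; cases ks.idxOf? l <;> simp [pvMinO]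

-- shifting the keyword list shifts every rank by one
theorem pvIdxMin_shift (k : String) (ks lows : List String) (hk : ¬ lows.contains k)
    (o : Option Nat) :
    pvIdxMin (k :: ks) lows (o.map (· + 1)) = (pvIdxMin ks lows o).map (· + 1) := by
  induction lows generalizing o with
  | nil => rfl
  | cons l rest ih =>
    have hk' : ¬ (k = l ∨ k ∈ rest) := by simpa [List.contains_cons] using hk
    have hlk : l ≠ k := fun h => hk' (Or.inl h.symm)
    have hrest : ¬ rest.contains k := fun h => hk' (Or.inr (by simpa using h))
    rw [pvIdxMin, List.foldl_cons, pvIdxMin, List.foldl_cons]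
    have hidx : (k :: ks).idxOf? l = (ks.idxOf? l).map (· + 1) := by
      simp [List.idxOf?, List.findIdx?_cons, beq_iff_eq, hlk.symm]
    have hmin : pvMinO (o.map (· + 1)) ((k :: ks).idxOf? l)
        = (pvMinO o (ks.idxOf? l)).map (· + 1) := by
      rw [hidx]
      cases o <;> cases ks.idxOf? l <;> simp [pvMinO, Nat.succ_min_succ]
    rw [hmin]
    exact ih hrest _

-- A's scan equals looking up the minimum rank in the keyword list
theorem pvScanA_char (ks : List String) (lows : List String) :
    pvScanA ks lows =
      match pvIdxMin ks lows none with
      | some i => ks.getD i "ubuntu-latest"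
      | none => "ubuntu-latest" := by
  induction ks with
  | nil =>
    have : pvIdxMin [] lows none = none := by
      induction lows with
      | nil => rfl
      | cons l rest ih => simpa [pvIdxMin, List.idxOf?, pvMinO] using ih
    simp [pvScanA, this]
  | cons k ks ih =>
    by_cases hk : lows.contains k
    · have h0 : pvIdxMin (k :: ks) lows none = some 0 := by
        obtain ⟨u, v, huv⟩ := List.append_of_mem (by simpa using hk)
        subst huv
        rw [pvIdxMin, List.foldl_append, List.foldl_cons]
        apply pvIdxMin_zero
        have : (k :: ks).idxOf? k = some 0 := by simp [List.idxOf?, List.findIdx?_cons]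
        rw [this]; cases (u.foldl (fun a l => pvMinO a ((k :: ks).idxOf? l)) none) <;>
          simp [pvMinO]
      rw [show pvScanA (k :: ks) lows = if lows.contains k then k else pvScanA ks lows from rfl,
        if_pos hk, h0]
      rfl
    · have hshift := pvIdxMin_shift k ks lows hk none
      simp only [Option.map_none] at hshift
      rw [pvScanA]
      simp only [hk, ih, hshift]
      cases pvIdxMin ks lows none <;> simp

-- range bound: the minimum rank, when defined, indexes into the keyword list
theorem pvIdxMin_lt (ks lows : List String) (o : Option Nat)
    (ho : ∀ i, o = some i → i < ks.length) :
    ∀ i, pvIdxMin ks lows o = some i → i < ks.length := by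
  induction lows generalizing o with
  | nil => exact ho
  | cons l rest ih =>
    rw [pvIdxMin, List.foldl_cons]
    apply ih
    intro i hi
    cases h : ks.idxOf? l with
    | none =>
      rw [h] at hi
      cases o with
      | none => simp [pvMinO] at hi
      | some j => simp [pvMinO] at hi; exact hi ▸ ho j rfl
    | some m =>
      have hm := (pvIdx_spec h).1
      rw [h] at hi
      cases o with
      | none => simp [pvMinO] at hi; omega
      | some j =>
        have hj := ho j rfl
        simp [pvMinO] at hi
        omega

-- ===== VERDICT (by name: the statement is the Claim_ definition above) =====
theorem determine_runner_type_py_spec : Claim_equal_determine_runner_type_py := by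
  intro labels _
  unfold Spec_determine_runner_type_py determine_runner_type_py determine_runner_type_py_alt
  have hstep : pvStepB = fun b lab => pvCore b (PySem.Str.lower lab) := rfl
  rw [hstep, ← List.foldl_map (f := PySem.Str.lower) (g := pvCore)]
  have : pvMval none = (none : Option (String × Int)) := rfl
  rw [← this, pvFoldB, pvScanA_char]
  cases h : pvIdxMin pvKws (labels.map PySem.Str.lower) none with
  | none => simp [pvMval]
  | some i =>
    have hi : i < pvKws.length := pvIdxMin_lt pvKws _ none (by simp) i h
    simp [pvMval, List.getD_eq_getElem?_getD, List.getElem?_eq_getElem hi]
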